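-- pv_equiv track=rewrite | github.com/fordoubleblindsubmission/shiny-octo-chainsaw | Eytzinger.py | Bnary
-- ===== SOURCE A (Python) =====
-- def Bnary_level_start(index, length_rounded, B):
--     num = 1
--     length_rounded //= B
--     while index % length_rounded != 0:
--         length_rounded //= B
--         num *= B
--     return num
--
-- def Bnary(index, length, B, p=False):
--     length_rounded = B
--     while length_rounded <= length:
--         length_rounded *= B
--     index += 1
--     start = Bnary_level_start(index, length_rounded, B)
--     size_to_consider = length_rounded//start
--     return start + (B-1)*((index-1)//(size_to_consider)) + ((index-1) % size_to_consider)//(size_to_consider//B) - 1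
-- ===== SOURCE B (Python) =====
-- def Bnary(index, length, B, p=False):
--     # B-ary search-tree layout, computed by an explicit top-down descent:
--     # walk from the root towards the leaves, keeping the node's number within
--     # its level, the index's offset inside the node's subrange, and the first
--     # slot value of the level; stop at the level whose node owns the index.
--     size = B
--     while size <= length:
--         size *= B                     # size = smallest power of B exceeding length
--     node, rel = divmod(index, size)   # reduce into the padded span (periodic extension)
--     first = 1                         # first = B**level
--     while True:
--         size //= B                    # child subrange size at this level
--         if (rel + 1) % size == 0:     # rel falls on a key slot of this level's node
--             return first + (B - 1) * node + rel // size - 1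
--         node = B * node + rel // size # descend into the child that contains rel
--         rel %= size
--         first *= B
-- ===== Notes on version B (the rewrite author's own statement) =====
-- stated objective: alternative
-- what changed: B replaces A's bottom-up scheme (helper loop locating the level's power-of-B divisor, then one closed-form expression over global floor divisions) by an explicit top-down tree descent that maintains the current node number, the offset inside its subrange and the level's first slot, returning directly from the accumulated loop state.
import Mathlib
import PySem

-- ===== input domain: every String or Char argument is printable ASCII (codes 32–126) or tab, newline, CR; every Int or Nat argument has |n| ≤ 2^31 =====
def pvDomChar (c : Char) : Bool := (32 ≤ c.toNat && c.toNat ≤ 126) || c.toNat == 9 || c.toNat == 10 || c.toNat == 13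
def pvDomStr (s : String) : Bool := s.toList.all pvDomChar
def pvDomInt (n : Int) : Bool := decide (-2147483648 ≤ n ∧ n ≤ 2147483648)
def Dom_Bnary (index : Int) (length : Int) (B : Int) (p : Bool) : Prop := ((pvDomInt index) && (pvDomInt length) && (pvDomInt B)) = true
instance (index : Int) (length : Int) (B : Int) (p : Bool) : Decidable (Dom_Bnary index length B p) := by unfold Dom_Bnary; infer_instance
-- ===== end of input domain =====

-- B replaces A's bottom-up scheme (locate the level's power-of-B divisor, then one closed
-- formula over global divisions) by an explicit top-down tree descent maintaining the node
-- number, the in-node offset and the level's first slot; same cost (alternative, not faster).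

-- ===== PORT A =====
-- 'while length_rounded <= length: length_rounded *= B' (fuel 64: totality guard only;
-- under Pre_ (|B| ≥ 2) and the domain bound |length| ≤ 2^31 the loop runs < 40 times)
def BnaryLoop1 (length B : Int) : Nat → Int → Int
  | 0, lr => lr
  | f+1, lr => if lr ≤ length then BnaryLoop1 length B f (lr * B) else lr

-- Bnary_level_start's loop (fuel 100: totality guard only; it runs at most h-1 ≤ 64 times)
def BnaryLevelStart (i1 B : Int) : Nat → Int → Int → Int
  | 0, _, num => num
  | f+1, lr, num =>
      if PySem.Int.mod i1 lr ≠ 0 then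
        BnaryLevelStart i1 B f (PySem.Int.floordiv lr B) (num * B)
      else num

def Bnary (index : Int) (length : Int) (B : Int) (p : Bool) : Int :=
  let length_rounded := BnaryLoop1 length B 64 B
  let i1 := index + 1
  let start := BnaryLevelStart i1 B 100 (PySem.Int.floordiv length_rounded B) 1
  let size := PySem.Int.floordiv length_rounded start
  start + (B - 1) * PySem.Int.floordiv (i1 - 1) size
    + PySem.Int.floordiv (PySem.Int.mod (i1 - 1) size) (PySem.Int.floordiv size B) - 1

-- ===== PORT B =====
-- 'while size <= length: size *= B' (same fuel-64 totality guard)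
def BnaryAltSize (length B : Int) : Nat → Int → Int
  | 0, sz => sz
  | f+1, sz => if sz ≤ length then BnaryAltSize length B f (sz * B) else sz

-- the descent loop 'while True: size //= B; …' (fuel 100: totality guard only;
-- the descent runs at most h ≤ 65 levels)
def BnaryAltLoop (B : Int) : Nat → Int → Int → Int → Int → Int
  | 0, _, _, _, _ => 0
  | f+1, size, node, rel, first =>
      let sz := PySem.Int.floordiv size B
      if PySem.Int.mod (rel + 1) sz = 0 then
        first + (B - 1) * node + PySem.Int.floordiv rel sz - 1
      else
        BnaryAltLoop B f sz (B * node + PySem.Int.floordiv rel sz)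
          (PySem.Int.mod rel sz) (first * B)

def Bnary_alt (index : Int) (length : Int) (B : Int) (p : Bool) : Int :=
  let size := BnaryAltSize length B 64 B
  let node := PySem.Int.floordiv index size
  let rel := PySem.Int.mod index size
  BnaryAltLoop B 100 size node rel 1

-- ===== PRECONDITION & SPEC =====
-- Pre_ excludes exactly the inputs on which A never returns: B = 0 (infinite power loop for
-- length ≥ 0, ZeroDivisionError for length < 0) and B = ±1 with length ≥ 1 (the power loop
-- never exceeds length, so A loops forever).
def Pre_Bnary (index : Int) (length : Int) (B : Int) (p : Bool) : Prop :=
  (2 ≤ B ∨ B ≤ -2) ∨ (B ≠ 0 ∧ length < 1)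
instance (index : Int) (length : Int) (B : Int) (p : Bool) : Decidable (Pre_Bnary index length B p) := by unfold Pre_Bnary; infer_instance
def pvWitness_Bnary : Int × Int × Int × Bool := (5, 10, 2, false)

def Spec_Bnary (index : Int) (length : Int) (B : Int) (p : Bool) (out : Int) : Prop := out = Bnary_alt index length B p
instance (index : Int) (length : Int) (B : Int) (p : Bool) (out : Int) : Decidable (Spec_Bnary index length B p out) := by unfold Spec_Bnary; infer_instance

-- ===== CLAIM (what is proved, stated in full; the proofs are below) =====
def Claim_equal_Bnary : Prop := ∀ (index : Int) (length : Int) (B : Int) (p : Bool), Dom_Bnary index length B p → Pre_Bnary index length B p → Spec_Bnary index length B p (Bnary index length B p)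

-- ===== LEMMAS AND PROOFS =====

-- capped B-adic valuation of t (proof-only helper relating both stopping rules)
def BnaryVal (B : Int) : Nat → Int → Nat
  | 0, _ => 0
  | c+1, t => if PySem.Int.mod t B = 0 then BnaryVal B c (PySem.Int.floordiv t B) + 1 else 0

lemma fd_mul_cancel (a b : Int) (hb : b ≠ 0) : PySem.Int.floordiv (a * b) b = a := by
  simpa [PySem.Int.floordiv] using Int.mul_fdiv_cancel a hb

lemma fd_exact {B t : Int} (hB : B ≠ 0) (h : B ∣ t) : t = B * PySem.Int.floordiv t B := by
  obtain ⟨k, rfl⟩ := h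
  have hk : PySem.Int.floordiv (B * k) B = k := by
    rw [mul_comm]; exact fd_mul_cancel k B hB
  rw [hk]

lemma fd_pow_succ (B : Int) (hB : B ≠ 0) (m : Nat) :
    PySem.Int.floordiv (B ^ (m + 1)) B = B ^ m := by
  rw [pow_succ]; exact fd_mul_cancel _ _ hB

lemma fd_pow_sub (B : Int) (hB : B ≠ 0) {j h : Nat} (hj : j ≤ h) :
    PySem.Int.floordiv (B ^ h) (B ^ j) = B ^ (h - j) := by
  have : B ^ h = B ^ (h - j) * B ^ j := by
    rw [← pow_add]; congr 1; omega
  rw [this]; exact fd_mul_cancel _ _ (pow_ne_zero j hB)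

lemma val_le (B : Int) : ∀ (c : Nat) (t : Int), BnaryVal B c t ≤ c := by
  intro c
  induction c with
  | zero => intro t; simp [BnaryVal]
  | succ c ih =>
      intro t
      by_cases h0 : PySem.Int.mod t B = 0 <;> simp [BnaryVal, h0]
      exact ih _

lemma val_of_dvd (B : Int) (hB : B ≠ 0) :
    ∀ (c : Nat) (t : Int), B ^ c ∣ t → BnaryVal B c t = c := by
  intro c
  induction c with
  | zero => intro t _; rfl
  | succ c ih =>
      intro t hd
      have hBd : B ∣ t := dvd_trans (dvd_pow_self B (Nat.succ_ne_zero c)) hd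
      have h0 : PySem.Int.mod t B = 0 := (PySem.Int.mod_eq_zero_iff_dvd _ _).mpr hBd
      have hq : B ^ c ∣ PySem.Int.floordiv t B := by
        obtain ⟨k, hk⟩ := hd
        refine ⟨k, ?_⟩
        rw [hk, pow_succ, show B ^ c * B * k = (B ^ c * k) * B by ring,
          fd_mul_cancel _ _ hB]
      simp [BnaryVal, h0, ih _ hq]

lemma val_not_dvd (B : Int) (hB : B ≠ 0) :
    ∀ (c : Nat) (t : Int), ¬ B ^ (c + 1) ∣ t →
      BnaryVal B (c + 1) t = BnaryVal B c t := by
  intro c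
  induction c with
  | zero =>
      intro t hnd
      have h1 : ¬ B ∣ t := by rwa [pow_one] at hnd
      have h0 : PySem.Int.mod t B ≠ 0 := by
        rw [Ne, PySem.Int.mod_eq_zero_iff_dvd]; exact h1
      simp [BnaryVal, h0]
  | succ c ih =>
      intro t hnd
      by_cases hBd : B ∣ t
      · have h0 : PySem.Int.mod t B = 0 := (PySem.Int.mod_eq_zero_iff_dvd _ _).mpr hBd
        have hnd' : ¬ B ^ (c + 1) ∣ PySem.Int.floordiv t B := by
          intro ⟨k, hk⟩
          apply hnd
          refine ⟨k, ?_⟩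
          calc t = B * PySem.Int.floordiv t B := fd_exact hB hBd
            _ = B * (B ^ (c + 1) * k) := by rw [hk]
            _ = B ^ (c + 1 + 1) * k := by ring
        calc BnaryVal B (c + 1 + 1) t
            = BnaryVal B (c + 1) (PySem.Int.floordiv t B) + 1 := by
              rw [show BnaryVal B (c + 1 + 1) t =
                    if PySem.Int.mod t B = 0 then
                      BnaryVal B (c + 1) (PySem.Int.floordiv t B) + 1
                    else 0 from rfl, if_pos h0]
          _ = BnaryVal B c (PySem.Int.floordiv t B) + 1 := by rw [ih _ hnd']
          _ = BnaryVal B (c + 1) t := by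
              rw [show BnaryVal B (c + 1) t =
                    if PySem.Int.mod t B = 0 then
                      BnaryVal B c (PySem.Int.floordiv t B) + 1
                    else 0 from rfl, if_pos h0]
      · have h0 : PySem.Int.mod t B ≠ 0 := by
          rw [Ne, PySem.Int.mod_eq_zero_iff_dvd]; exact hBd
        simp [BnaryVal, h0]

lemma levelStart_eq (B i1 : Int) (hB : B ≠ 0) :
    ∀ (m f : Nat) (num : Int), m ≤ f →
      BnaryLevelStart i1 B f (B ^ m) num = num * B ^ (m - BnaryVal B m i1) := by
  intro m
  induction m with
  | zero =>
      intro f num _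
      have h0 : PySem.Int.mod i1 (B ^ 0) = 0 := by
        rw [PySem.Int.mod_eq_zero_iff_dvd, pow_zero]; exact one_dvd i1
      cases f with
      | zero => simp [BnaryLevelStart, BnaryVal]
      | succ f => simp [BnaryLevelStart, BnaryVal]
  | succ m ih =>
      intro f num hf
      obtain ⟨f', rfl⟩ : ∃ f', f = f' + 1 := ⟨f - 1, by omega⟩
      by_cases hd : B ^ (m + 1) ∣ i1
      · have h0 : PySem.Int.mod i1 (B ^ (m + 1)) = 0 :=
          (PySem.Int.mod_eq_zero_iff_dvd _ _).mpr hd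
        simp [BnaryLevelStart, h0, val_of_dvd B hB (m + 1) i1 hd]
      · have h0 : PySem.Int.mod i1 (B ^ (m + 1)) ≠ 0 := by
          rw [Ne, PySem.Int.mod_eq_zero_iff_dvd]; exact hd
        rw [show BnaryLevelStart i1 B (f' + 1) (B ^ (m + 1)) num =
              if PySem.Int.mod i1 (B ^ (m + 1)) ≠ 0 then
                BnaryLevelStart i1 B f' (PySem.Int.floordiv (B ^ (m + 1)) B) (num * B)
              else num from rfl,
          if_pos h0, fd_pow_succ B hB m, ih f' (num * B) (by omega),
          val_not_dvd B hB m i1 hd]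
        have hv : BnaryVal B m i1 ≤ m := val_le B m i1
        rw [show m + 1 - BnaryVal B m i1 = (m - BnaryVal B m i1) + 1 by omega,
          pow_succ]
        ring

-- both first loops are the same code: A's produces the same power of B
lemma altSize_eq_loop1 (length B : Int) :
    ∀ (f : Nat) (sz : Int), BnaryAltSize length B f sz = BnaryLoop1 length B f sz := by
  intro f
  induction f with
  | zero => intro sz; rfl
  | succ f ih =>
      intro sz
      by_cases hle : sz ≤ length <;> simp [BnaryAltSize, BnaryLoop1, hle, ih]

lemma loop1_spec (length B : Int) :
    ∀ (f h : Nat), ∃ h', BnaryLoop1 length B f (B ^ h) = B ^ h' ∧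
      h ≤ h' ∧ h' ≤ h + f := by
  intro f
  induction f with
  | zero => intro h; exact ⟨h, rfl, le_refl _, by omega⟩
  | succ f ih =>
      intro h
      by_cases hle : B ^ h ≤ length
      · obtain ⟨h', hEq, h1, h2⟩ := ih (h + 1)
        refine ⟨h', ?_, by omega, by omega⟩
        rw [show BnaryLoop1 length B (f + 1) (B ^ h) =
              if B ^ h ≤ length then BnaryLoop1 length B f (B ^ h * B)
              else B ^ h from rfl,
          if_pos hle, ← pow_succ, hEq]
      · exact ⟨h, by simp [BnaryLoop1, hle], le_refl _, by omega⟩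

-- floor-division/mod composition: reducing i mod B^(m+1) first does not change
-- divisibility of i+1, the further quotient, or the further remainder
lemma fmod_pow_step (B i : Int) (hB : B ≠ 0) (m : Nat) :
    PySem.Int.mod (PySem.Int.mod i (B ^ (m + 1))) (B ^ m) = PySem.Int.mod i (B ^ m) := by
  have hdvd : (B : Int) ^ m ∣ B ^ (m + 1) := pow_dvd_pow B (by omega)
  simpa [PySem.Int.mod] using Int.fmod_fmod_of_dvd i hdvd

lemma fdiv_pow_step (B i : Int) (hB : B ≠ 0) (m : Nat) :
    B * PySem.Int.floordiv i (B ^ (m + 1))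
      + PySem.Int.floordiv (PySem.Int.mod i (B ^ (m + 1))) (B ^ m)
      = PySem.Int.floordiv i (B ^ m) := by
  simp only [PySem.Int.floordiv, PySem.Int.mod]
  have hi := Int.mul_fdiv_add_fmod i (B ^ (m + 1))
  have h2 : i = Int.fmod i (B ^ (m + 1)) + (Int.fdiv i (B ^ (m + 1)) * B) * B ^ m := by
    conv_lhs => rw [← hi]
    rw [pow_succ]; ring
  conv_rhs => rw [h2]
  rw [Int.add_mul_fdiv_right _ _ (pow_ne_zero m hB)]
  ring

lemma dvd_succ_fmod (B i : Int) (hB : B ≠ 0) (m : Nat) :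
    (B ^ m ∣ PySem.Int.mod i (B ^ (m + 1)) + 1) ↔ (B ^ m ∣ i + 1) := by
  simp only [PySem.Int.mod]
  have hi := Int.mul_fdiv_add_fmod i (B ^ (m + 1))
  have key : i + 1 = (Int.fmod i (B ^ (m + 1)) + 1)
      + B ^ m * (B * Int.fdiv i (B ^ (m + 1))) := by
    conv_lhs => rw [← hi]
    rw [pow_succ]; ring
  constructor
  · intro hd
    rw [key]; exact dvd_add hd ⟨_, rfl⟩
  · intro hd
    have h3 : Int.fmod i (B ^ (m + 1)) + 1
        = (i + 1) - B ^ m * (B * Int.fdiv i (B ^ (m + 1))) := by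
      rw [key]; ring
    rw [h3]; exact dvd_sub hd ⟨_, rfl⟩

-- the descent loop computes the same closed form A's arithmetic produces
lemma altLoop_eq (B i : Int) (hB : B ≠ 0) :
    ∀ (n : Nat), ∀ (c : Nat) (first : Int), n + 1 ≤ c →
      BnaryAltLoop B c (B ^ (n + 1)) (PySem.Int.floordiv i (B ^ (n + 1)))
          (PySem.Int.mod i (B ^ (n + 1))) first
        = first * B ^ (n - BnaryVal B n (i + 1))
          + (B - 1) * PySem.Int.floordiv i (B ^ (BnaryVal B n (i + 1) + 1))
          + PySem.Int.floordiv (PySem.Int.mod i (B ^ (BnaryVal B n (i + 1) + 1)))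
              (B ^ (BnaryVal B n (i + 1))) - 1 := by
  intro n
  induction n with
  | zero =>
      intro c first hc
      obtain ⟨c', rfl⟩ : ∃ c', c = c' + 1 := ⟨c - 1, by omega⟩
      have hsz : PySem.Int.floordiv (B ^ 1) B = 1 := by
        simpa using fd_pow_succ B hB 0
      have h0 : PySem.Int.mod (PySem.Int.mod i (B ^ 1) + 1) 1 = 0 := by
        rw [PySem.Int.mod_eq_zero_iff_dvd]; exact one_dvd _
      rw [show BnaryAltLoop B (c' + 1) (B ^ 1) (PySem.Int.floordiv i (B ^ 1))
            (PySem.Int.mod i (B ^ 1)) first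
          = (if PySem.Int.mod (PySem.Int.mod i (B ^ 1) + 1)
                (PySem.Int.floordiv (B ^ 1) B) = 0 then
              first + (B - 1) * PySem.Int.floordiv i (B ^ 1)
                + PySem.Int.floordiv (PySem.Int.mod i (B ^ 1))
                    (PySem.Int.floordiv (B ^ 1) B) - 1
            else BnaryAltLoop B c' (PySem.Int.floordiv (B ^ 1) B)
              (B * PySem.Int.floordiv i (B ^ 1)
                + PySem.Int.floordiv (PySem.Int.mod i (B ^ 1))
                    (PySem.Int.floordiv (B ^ 1) B))
              (PySem.Int.mod (PySem.Int.mod i (B ^ 1))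
                (PySem.Int.floordiv (B ^ 1) B)) (first * B)) from rfl,
        hsz, if_pos h0]
      have hfd1 : ∀ x : Int, PySem.Int.floordiv x 1 = x := by
        intro x; simpa [PySem.Int.floordiv] using Int.fdiv_one x
      simp [BnaryVal, hfd1]
  | succ n ih =>
      intro c first hc
      obtain ⟨c', rfl⟩ : ∃ c', c = c' + 1 := ⟨c - 1, by omega⟩
      have hsz : PySem.Int.floordiv (B ^ (n + 2)) B = B ^ (n + 1) :=
        fd_pow_succ B hB (n + 1)
      rw [show BnaryAltLoop B (c' + 1) (B ^ (n + 2)) (PySem.Int.floordiv i (B ^ (n + 2)))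
            (PySem.Int.mod i (B ^ (n + 2))) first
          = (if PySem.Int.mod (PySem.Int.mod i (B ^ (n + 2)) + 1)
                (PySem.Int.floordiv (B ^ (n + 2)) B) = 0 then
              first + (B - 1) * PySem.Int.floordiv i (B ^ (n + 2))
                + PySem.Int.floordiv (PySem.Int.mod i (B ^ (n + 2)))
                    (PySem.Int.floordiv (B ^ (n + 2)) B) - 1
            else BnaryAltLoop B c' (PySem.Int.floordiv (B ^ (n + 2)) B)
              (B * PySem.Int.floordiv i (B ^ (n + 2))
                + PySem.Int.floordiv (PySem.Int.mod i (B ^ (n + 2)))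
                    (PySem.Int.floordiv (B ^ (n + 2)) B))
              (PySem.Int.mod (PySem.Int.mod i (B ^ (n + 2)))
                (PySem.Int.floordiv (B ^ (n + 2)) B)) (first * B)) from rfl,
        hsz]
      by_cases hd : B ^ (n + 1) ∣ i + 1
      · have h0 : PySem.Int.mod (PySem.Int.mod i (B ^ (n + 2)) + 1) (B ^ (n + 1)) = 0 := by
          rw [PySem.Int.mod_eq_zero_iff_dvd]
          exact (dvd_succ_fmod B i hB (n + 1)).mpr hd
        rw [if_pos h0, val_of_dvd B hB (n + 1) (i + 1) hd]
        simp
      · have h0 : PySem.Int.mod (PySem.Int.mod i (B ^ (n + 2)) + 1) (B ^ (n + 1)) ≠ 0 := by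
          rw [Ne, PySem.Int.mod_eq_zero_iff_dvd, dvd_succ_fmod B i hB (n + 1)]
          exact hd
        rw [if_neg h0, fdiv_pow_step B i hB (n + 1), fmod_pow_step B i hB (n + 1),
          ih c' (first * B) (by omega), val_not_dvd B hB n (i + 1) hd]
        have hv : BnaryVal B n (i + 1) ≤ n := val_le B n (i + 1)
        rw [show n + 1 - BnaryVal B n (i + 1) = (n - BnaryVal B n (i + 1)) + 1 by omega,
          pow_succ]
        ring

-- ===== VERDICT (by name: the statement is the Claim_ definition above) =====
theorem Bnary_spec : Claim_equal_Bnary := by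
  intro index length B p _hdom hpre
  unfold Spec_Bnary
  have hB : B ≠ 0 := by
    unfold Pre_Bnary at hpre
    rcases hpre with (h | h) | ⟨h, -⟩ <;> omega
  obtain ⟨h', hEq, h1, h65⟩ := loop1_spec length B 64 1
  rw [pow_one] at hEq
  simp only [Bnary, Bnary_alt, altSize_eq_loop1, hEq]
  set e := BnaryVal B (h' - 1) (index + 1) with he
  have hv : e ≤ h' - 1 := val_le B (h' - 1) (index + 1)
  have hm1 : h' = (h' - 1) + 1 := by omega
  -- A's side: start = B^(h'-1-e), size = B^(e+1), size//B = B^e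
  have hstart : BnaryLevelStart (index + 1) B 100 (PySem.Int.floordiv (B ^ h') B) 1
      = B ^ (h' - 1 - e) := by
    conv_lhs => rw [hm1]
    rw [fd_pow_succ B hB, levelStart_eq B (index + 1) hB (h' - 1) 100 1 (by omega),
      ← he, one_mul]
  rw [hstart]
  have hje : h' - (h' - 1 - e) = e + 1 := by omega
  have hsize : PySem.Int.floordiv (B ^ h') (B ^ (h' - 1 - e)) = B ^ (e + 1) := by
    rw [fd_pow_sub B hB (by omega), hje]
  rw [hsize, fd_pow_succ B hB e]
  -- B's side: the descent loop's closed form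
  conv_rhs => rw [hm1]
  rw [altLoop_eq B index hB (h' - 1) 100 1 (by omega), ← he, one_mul]
  have : index + 1 - 1 = index := by ring
  rw [this]
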